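-- pv_equiv track=rewrite | github.com/mcoski8/tw | analysis/scripts/encode_rules.py | _max_run_in_ranks
-- ===== SOURCE A (Python) =====
-- def _max_run_in_ranks(ranks_iter) -> int:
--     """Longest consecutive run including wheel-low ace."""
--     rs = set(int(r) for r in ranks_iter)
--     if 14 in rs:
--         rs = rs | {1}
--     if not rs:
--         return 0
--     best = cur = 0
--     last = -2
--     for r in sorted(rs):
--         cur = cur + 1 if r == last + 1 else 1
--         best = max(best, cur)
--         last = r
--     return best
-- ===== SOURCE B (Python) =====
-- def _max_run_in_ranks(ranks_iter) -> int:
--     """Longest consecutive run including wheel-low ace."""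
--     rs = set(int(r) for r in ranks_iter)
--     if 14 in rs:
--         rs.add(1)
--     best = 0
--     for r in rs:
--         if r - 1 not in rs:          # r starts a run
--             length = 1
--             while r + length in rs:  # expand the run upward
--                 length += 1
--             if length > best:
--                 best = length
--     return best
-- ===== Notes on version B (the rewrite author's own statement) =====
-- stated objective: idiomatic
-- what changed: Replaces sort-then-linear-scan with the classic hash-set longest-consecutive-run algorithm: iterate the set, and only from run starts (r-1 not in set) expand upward by membership; no sorting, no last/cur scan state.
import Mathlib
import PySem

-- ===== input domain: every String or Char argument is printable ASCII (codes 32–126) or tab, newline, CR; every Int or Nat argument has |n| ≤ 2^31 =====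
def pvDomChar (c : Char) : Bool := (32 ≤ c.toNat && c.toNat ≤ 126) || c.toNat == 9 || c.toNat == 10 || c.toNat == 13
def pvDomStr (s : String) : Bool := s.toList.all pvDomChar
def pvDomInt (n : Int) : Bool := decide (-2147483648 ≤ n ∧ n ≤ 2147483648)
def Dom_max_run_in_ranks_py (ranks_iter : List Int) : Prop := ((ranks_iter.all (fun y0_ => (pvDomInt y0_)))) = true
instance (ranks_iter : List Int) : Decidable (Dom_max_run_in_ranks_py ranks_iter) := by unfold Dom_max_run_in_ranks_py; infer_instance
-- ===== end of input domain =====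

-- B replaces A's sort-and-scan with the hash-set run-start expansion algorithm (no sorting); same value everywhere.

-- ===== PORT A =====
-- loop body of A's 'for r in sorted(rs)' (state = (best, cur, last))
def pvStepA (s : Int × Int × Int) (r : Int) : Int × Int × Int :=
  let cur := if r == s.2.2 + 1 then s.2.1 + 1 else 1
  (max s.1 cur, cur, r)

def max_run_in_ranks_py (ranks_iter : List Int) : Int :=
  let rs0 : PySem.Set Int := PySem.Set.ofList ranks_iter
  let rs : PySem.Set Int := if PySem.Set.contains rs0 14 then PySem.Set.union rs0 [1] else rs0
  if rs = [] then 0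
  else ((PySem.List.sorted rs (fun x => x) false).foldl pvStepA ((0 : Int), (0 : Int), (-2 : Int))).1

-- ===== PORT B =====
-- B's inner 'while r + length in rs: length += 1'; fuel rs.length always suffices (proved below)
def pvExpand (rs : List Int) (r : Int) : Nat → Int → Int
  | 0, length => length
  | fuel+1, length => if (r + length) ∈ rs then pvExpand rs r fuel (length + 1) else length

-- loop body of B's 'for r in rs'
def pvStepB (rs : List Int) (best r : Int) : Int :=
  if (r - 1) ∈ rs then best
  else
    let length := pvExpand rs r rs.length 1
    if length > best then length else best

def max_run_in_ranks_py_alt (ranks_iter : List Int) : Int :=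
  let rs0 : PySem.Set Int := PySem.Set.ofList ranks_iter
  let rs : PySem.Set Int := if PySem.Set.contains rs0 14 then PySem.Set.add rs0 1 else rs0
  rs.foldl (pvStepB rs) 0

-- ===== PRECONDITION & SPEC =====
def Spec_max_run_in_ranks_py (ranks_iter : List Int) (out : Int) : Prop := out = max_run_in_ranks_py_alt ranks_iter
instance (ranks_iter : List Int) (out : Int) : Decidable (Spec_max_run_in_ranks_py ranks_iter out) := by unfold Spec_max_run_in_ranks_py; infer_instance

-- ===== CLAIM (what is proved, stated in full; the proofs are below) =====
def Claim_equal_max_run_in_ranks_py : Prop := ∀ (ranks_iter : List Int), Dom_max_run_in_ranks_py ranks_iter → Spec_max_run_in_ranks_py ranks_iter (max_run_in_ranks_py ranks_iter)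

-- ===== LEMMAS AND PROOFS =====

lemma pvLen_le {L S : List Int} (hN : L.Nodup) (hsub : L ⊆ S) : L.length ≤ S.length :=
  (List.subperm_of_subset hN hsub).length_le

lemma pvUpExists (S : List Int) (x : Int) : ∃ k : ℕ, x + (k : Int) ∉ S := by
  by_contra h
  push_neg at h
  have hnd : ((List.range (S.length + 1)).map (fun k : ℕ => x + (k : Int))).Nodup := by
    refine List.Nodup.map ?_ List.nodup_range
    intro a b hab; simpa using hab
  have hsub : ((List.range (S.length + 1)).map (fun k : ℕ => x + (k : Int))) ⊆ S := by
    intro y hy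
    simp only [List.mem_map, List.mem_range] at hy
    obtain ⟨k, _, rfl⟩ := hy
    exact h k
  have := pvLen_le hnd hsub
  simp only [List.length_map, List.length_range] at this
  omega

lemma pvDownExists (S : List Int) (x : Int) : ∃ k : ℕ, x - (k : Int) ∉ S := by
  by_contra h
  push_neg at h
  have hnd : ((List.range (S.length + 1)).map (fun k : ℕ => x - (k : Int))).Nodup := by
    refine List.Nodup.map ?_ List.nodup_range
    intro a b hab; simpa using hab
  have hsub : ((List.range (S.length + 1)).map (fun k : ℕ => x - (k : Int))) ⊆ S := by
    intro y hy
    simp only [List.mem_map, List.mem_range] at hy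
    obtain ⟨k, _, rfl⟩ := hy
    exact h k
  have := pvLen_le hnd hsub
  simp only [List.length_map, List.length_range] at this
  omega

/-- length of the consecutive run going up from `x` (0 if `x ∉ S`). -/
def pvV (S : List Int) (x : Int) : ℕ := Nat.find (pvUpExists S x)
/-- length of the consecutive run going down from `x` (0 if `x ∉ S`). -/
def pvD (S : List Int) (x : Int) : ℕ := Nat.find (pvDownExists S x)

lemma pvV_mem {S : List Int} {x : Int} (k : ℕ) (hk : k < pvV S x) : x + (k : Int) ∈ S :=
  not_not.mp (Nat.find_min _ hk)

lemma pvV_not (S : List Int) (x : Int) : x + (pvV S x : Int) ∉ S := by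
  unfold pvV; exact Nat.find_spec (pvUpExists S x)

lemma pvV_le {S : List Int} {x : Int} {n : ℕ} (h : ∀ k < n, x + (k : Int) ∈ S) : n ≤ pvV S x := by
  unfold pvV
  rw [Nat.le_find_iff]
  intro m hm
  exact fun hc => hc (h m hm)

lemma pvD_mem {S : List Int} {x : Int} (k : ℕ) (hk : k < pvD S x) : x - (k : Int) ∈ S :=
  not_not.mp (Nat.find_min _ hk)

lemma pvD_not (S : List Int) (x : Int) : x - (pvD S x : Int) ∉ S := by
  unfold pvD; exact Nat.find_spec (pvDownExists S x)

lemma pvD_le {S : List Int} {x : Int} {n : ℕ} (h : ∀ k < n, x - (k : Int) ∈ S) : n ≤ pvD S x := by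
  unfold pvD
  rw [Nat.le_find_iff]
  intro m hm
  exact fun hc => hc (h m hm)

lemma pvV_zero {S : List Int} {x : Int} (h : x ∉ S) : pvV S x = 0 := by
  unfold pvV
  rw [Nat.find_eq_zero]
  simpa using h

lemma pvD_zero {S : List Int} {x : Int} (h : x ∉ S) : pvD S x = 0 := by
  unfold pvD
  rw [Nat.find_eq_zero]
  simpa using h

lemma pvV_succ {S : List Int} {x : Int} (h : x ∈ S) : pvV S x = pvV S (x + 1) + 1 := by
  unfold pvV
  rw [Nat.find_eq_iff]
  refine ⟨?_, ?_⟩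
  · have h2 := pvV_not S (x + 1)
    unfold pvV at h2
    rw [show x + ((Nat.find (pvUpExists S (x + 1)) + 1 : ℕ) : Int)
          = (x + 1) + (Nat.find (pvUpExists S (x + 1)) : Int) from by push_cast; ring]
    exact h2
  · intro m hm
    rw [not_not]
    match m, hm with
    | 0, _ => simpa using h
    | (j + 1), hm =>
      have hj : j < pvV S (x + 1) := by unfold pvV; omega
      have h3 := pvV_mem j hj
      rw [show x + ((j + 1 : ℕ) : Int) = (x + 1) + (j : Int) from by push_cast; ring]
      exact h3

lemma pvD_succ {S : List Int} {x : Int} (h : x ∈ S) : pvD S x = pvD S (x - 1) + 1 := by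
  unfold pvD
  rw [Nat.find_eq_iff]
  refine ⟨?_, ?_⟩
  · have h2 := pvD_not S (x - 1)
    unfold pvD at h2
    rw [show x - ((Nat.find (pvDownExists S (x - 1)) + 1 : ℕ) : Int)
          = (x - 1) - (Nat.find (pvDownExists S (x - 1)) : Int) from by push_cast; ring]
    exact h2
  · intro m hm
    rw [not_not]
    match m, hm with
    | 0, _ => simpa using h
    | (j + 1), hm =>
      have hj : j < pvD S (x - 1) := by unfold pvD; omega
      have h3 := pvD_mem j hj
      rw [show x - ((j + 1 : ℕ) : Int) = (x - 1) - (j : Int) from by push_cast; ring]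
      exact h3

lemma pvV_bound {S : List Int} {r : Int} (h : r ∈ S) : pvV S (r + 1) + 1 ≤ S.length := by
  have hnd : ((List.range (pvV S (r + 1) + 1)).map (fun k : ℕ => r + (k : Int))).Nodup := by
    refine List.Nodup.map ?_ List.nodup_range
    intro a b hab; simpa using hab
  have hsub : ((List.range (pvV S (r + 1) + 1)).map (fun k : ℕ => r + (k : Int))) ⊆ S := by
    intro y hy
    simp only [List.mem_map, List.mem_range] at hy
    obtain ⟨k, hk, rfl⟩ := hy
    match k, hk with
    | 0, _ => simpa using h
    | (j + 1), hk =>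
      have := pvV_mem (S := S) (x := r + 1) j (by omega)
      rw [show r + ((j + 1 : ℕ) : Int) = (r + 1) + (j : Int) from by push_cast; ring]
      exact this
  have := pvLen_le hnd hsub
  simp only [List.length_map, List.length_range] at this
  omega

lemma pvExpand_eq {S : List Int} {r : Int} :
    ∀ (fuel : ℕ) (len : Int), pvV S (r + len) ≤ fuel →
      pvExpand S r fuel len = len + (pvV S (r + len) : Int)
  | 0, len, h => by
      have h0 : pvV S (r + len) = 0 := by omega
      simp [pvExpand, h0]
  | (f + 1), len, h => by
      by_cases hm : (r + len) ∈ S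
      · have hs := pvV_succ hm
        have hrec := pvExpand_eq (S := S) (r := r) f (len + 1)
          (by rw [show r + (len + 1) = (r + len) + 1 from by ring]; omega)
        simp only [pvExpand, if_pos hm]
        rw [hrec, show r + (len + 1) = (r + len) + 1 from by ring, hs]
        push_cast; ring
      · have h0 : pvV S (r + len) = 0 := pvV_zero hm
        simp [pvExpand, hm, h0]

/-- running max of `f` over `l`, starting at 0 -/
def pvMaxOf (f : Int → Int) (l : List Int) : Int := l.foldl (fun b x => max b (f x)) 0

lemma pvMaxOf_nonneg {f : Int → Int} {l : List Int} : 0 ≤ pvMaxOf f l :=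
  (PySem.List.le_foldl_max_int l f 0).1

lemma le_pvMaxOf {f : Int → Int} {l : List Int} {x : Int} (hx : x ∈ l) : f x ≤ pvMaxOf f l :=
  (PySem.List.le_foldl_max_int l f 0).2 x hx

lemma pvFoldMax_le {f : Int → Int} : ∀ (l : List Int) (init c : Int), init ≤ c →
    (∀ x ∈ l, f x ≤ c) → l.foldl (fun b x => max b (f x)) init ≤ c
  | [], _, _, h0, _ => h0
  | x :: t, init, c, h0, h => by
      simp only [List.foldl_cons]
      exact pvFoldMax_le t _ c (by
        have := h x (by simp)
        simp only [max_le_iff]; exact ⟨h0, this⟩) (fun y hy => h y (by simp [hy]))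

lemma pvMaxOf_le {f : Int → Int} {l : List Int} {c : Int} (h0 : 0 ≤ c)
    (h : ∀ x ∈ l, f x ≤ c) : pvMaxOf f l ≤ c :=
  pvFoldMax_le l 0 c h0 h

lemma pvMaxOf_append {f : Int → Int} {p : List Int} {r : Int} :
    pvMaxOf f (p ++ [r]) = max (pvMaxOf f p) (f r) := by
  simp [pvMaxOf, List.foldl_append]

-- A's scan invariant: processing sorted-remainder u after prefix p, with cur = down-run of last
lemma pvA_inv (S : List Int) : ∀ (u p : List Int) (cur last : Int),
    (p ++ u).Pairwise (· < ·) →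
    (∀ x, x ∈ p ++ u ↔ x ∈ S) →
    (∀ x ∈ S, x ≤ last → x ∈ p) →
    last ∈ p →
    (∀ x ∈ p, x ≤ last) →
    cur = (pvD S last : Int) →
    (u.foldl pvStepA (pvMaxOf (fun x => (pvD S x : Int)) p, cur, last)).1
      = pvMaxOf (fun x => (pvD S x : Int)) (p ++ u)
  | [], p, cur, last, _, _, _, _, _, _ => by simp
  | r :: u', p, cur, last, hpw, hmem, hclosed, hlastp, hple, hcur => by
      have hrS : r ∈ S := (hmem r).mp (by simp)
      have hpw' := List.pairwise_append.mp hpw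
      have hlt : last < r := hpw'.2.2 last hlastp r (by simp)
      have hiff : r - 1 ∈ S ↔ r = last + 1 := by
        constructor
        · intro h
          have h1 : r - 1 ∈ p ++ r :: u' := (hmem _).mpr h
          rcases List.mem_append.mp h1 with h2 | h2
          · have := hple _ h2
            omega
          · rcases List.mem_cons.mp h2 with h3 | h3
            · omega
            · have := (List.pairwise_cons.mp hpw'.2.1).1 _ h3
              omega
        · intro h
          have : last ∈ S := (hmem last).mp (List.mem_append.mpr (Or.inl hlastp))
          rw [show r - 1 = last from by omega]
          exact this
      have hdr : pvD S r = (if r = last + 1 then pvD S last + 1 else 1) := by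
        rw [pvD_succ hrS]
        split
        · rename_i h
          rw [show r - 1 = last from by omega]
        · rename_i h
          rw [pvD_zero (fun hc => h (hiff.mp hc))]
      have hstep : pvStepA (pvMaxOf (fun x => (pvD S x : Int)) p, cur, last) r
          = (pvMaxOf (fun x => (pvD S x : Int)) (p ++ [r]), (pvD S r : Int), r) := by
        simp only [pvStepA, pvMaxOf_append]
        have hcur' : (if r == last + 1 then cur + 1 else (1 : Int)) = (pvD S r : Int) := by
          rw [hdr, hcur]
          by_cases h : r = last + 1 <;> simp [h]
        rw [hcur']
      have hrw : p ++ r :: u' = (p ++ [r]) ++ u' := by simp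
      simp only [List.foldl_cons, hstep]
      rw [hrw]
      refine pvA_inv S u' (p ++ [r]) _ r ?_ ?_ ?_ ?_ ?_ rfl
      · rw [← hrw]; exact hpw
      · intro x; rw [← hrw]; exact hmem x
      · intro x hxS hxle
        have h1 := (hmem x).mpr hxS
        rcases List.mem_append.mp h1 with h2 | h2
        · exact List.mem_append.mpr (Or.inl h2)
        · rcases List.mem_cons.mp h2 with h3 | h3
          · simp [h3]
          · have := (List.pairwise_cons.mp hpw'.2.1).1 _ h3
            omega
      · simp
      · intro x hx
        rcases List.mem_append.mp hx with h2 | h2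
        · have := hple _ h2; omega
        · simp at h2; omega

lemma pvMem_sorted {S : List Int} {x : Int} :
    x ∈ PySem.List.sorted S (fun y => y) false ↔ x ∈ S := PySem.List.mem_sorted S (fun y => y) false x

lemma pvSorted_pairwise_lt {S : List Int} (hN : S.Nodup) :
    (PySem.List.sorted S (fun y => y) false).Pairwise (· < ·) := by
  have h1 : (PySem.List.sorted S (fun y => y) false).Pairwise (fun a b => a ≤ b) :=
    PySem.List.sorted_pairwise (xs := S) (key := fun y => y)

  have h2 : (PySem.List.sorted S (fun y => y) false).Nodup :=
    (PySem.List.sorted_perm S (fun y => y) false).nodup_iff.mpr hN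
  have h3 := List.Pairwise.and h1 h2
  exact h3.imp (fun h => lt_of_le_of_ne h.1 h.2)

-- A's fold equals the max of the down-run length over the sorted set
lemma pvA_char {S : List Int} (hN : S.Nodup) (hne : S ≠ []) :
    ((PySem.List.sorted S (fun x => x) false).foldl pvStepA ((0 : Int), (0 : Int), (-2 : Int))).1
      = pvMaxOf (fun x => (pvD S x : Int)) (PySem.List.sorted S (fun x => x) false) := by
  have hne' : PySem.List.sorted S (fun x => x) false ≠ [] := by
    intro h
    exact hne ((PySem.List.sorted_eq_nil_iff S (fun x => x) false).mp h)
  rcases ht : PySem.List.sorted S (fun x => x) false with _ | ⟨r0, t'⟩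
  · exact absurd ht hne'
  have hpw : (r0 :: t').Pairwise (· < ·) := ht ▸ pvSorted_pairwise_lt hN
  have hmem : ∀ x, x ∈ r0 :: t' ↔ x ∈ S := by
    intro x; rw [← ht]; exact pvMem_sorted
  have hr0S : r0 ∈ S := (hmem r0).mp (by simp)
  have hmin : ∀ y ∈ S, r0 ≤ y :=
    PySem.List.key_head_sorted_le S (fun x => x) ht
  have hd0 : pvD S r0 = 1 := by
    rw [pvD_succ hr0S, pvD_zero (fun hc => by have := hmin _ hc; omega)]
  have hstep0 : pvStepA ((0 : Int), (0 : Int), (-2 : Int)) r0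
      = (pvMaxOf (fun x => (pvD S x : Int)) [r0], (pvD S r0 : Int), r0) := by
    simp only [pvStepA, pvMaxOf, List.foldl_cons, List.foldl_nil, hd0]
    by_cases h : r0 = -1 <;> simp [h]
  have := pvA_inv S t' [r0] (pvD S r0 : Int) r0
    (by simpa using hpw)
    (by intro x; simpa using hmem x)
    (by intro x hxS hxle; have := hmin x hxS; simp; omega)
    (by simp) (by intro x hx; simp at hx; omega) rfl
  simp only [List.foldl_cons, hstep0]
  simpa using this

-- B's fold equals the max of the up-run length over the run starts
lemma pvB_filter {S : List Int} (f : Int → Int) :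
    ∀ (l : List Int) (init : Int),
      l.foldl (fun b r => if (r - 1) ∈ S then b else max b (f r)) init
        = (l.filter (fun r => !(decide ((r - 1) ∈ S)))).foldl (fun b x => max b (f x)) init
  | [], _ => rfl
  | r :: t, init => by
      by_cases h : (r - 1) ∈ S <;>
        simp [List.foldl_cons, h, pvB_filter f t]

lemma pvB_char {S : List Int} :
    S.foldl (pvStepB S) 0
      = pvMaxOf (fun r => (pvV S r : Int)) (S.filter (fun r => !(decide ((r - 1) ∈ S)))) := by
  have hcongr : S.foldl (pvStepB S) 0
      = S.foldl (fun b r => if (r - 1) ∈ S then b else max b ((pvV S r : Int))) 0 := by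
    apply PySem.List.foldl_congr_mem
    intro best r hr
    by_cases h : (r - 1) ∈ S
    · simp [pvStepB, h]
    · have hb := pvV_bound hr
      have hfuel : pvV S (r + 1) ≤ S.length := by omega
      have he := pvExpand_eq (S := S) (r := r) S.length 1 hfuel
      have hv : pvV S r = pvV S (r + 1) + 1 := pvV_succ hr
      simp only [pvStepB, if_neg h, he, hv]
      push_cast
      rcases le_or_gt (1 + (pvV S (r + 1) : Int)) best with hc | hc
      · rw [if_neg (by omega)]; omega
      · rw [if_pos (by omega)]; omega
  rw [hcongr, pvB_filter, pvMaxOf]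

-- the two maxima agree: each down-run is dominated by the up-run from its start, and conversely
lemma pvBridge (S : List Int) :
    pvMaxOf (fun x => (pvD S x : Int)) (PySem.List.sorted S (fun x => x) false)
      = pvMaxOf (fun r => (pvV S r : Int)) (S.filter (fun r => !(decide ((r - 1) ∈ S)))) := by
  apply le_antisymm
  · apply pvMaxOf_le pvMaxOf_nonneg
    intro x hx
    have hxS : x ∈ S := pvMem_sorted.mp hx
    have hn1 : 1 ≤ pvD S x := by rw [pvD_succ hxS]; omega
    have ht0 : x - ((pvD S x : Int) - 1) ∈ S := by
      have := pvD_mem (S := S) (x := x) (pvD S x - 1) (by omega)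
      rw [show x - ((pvD S x : Int) - 1) = x - ((pvD S x - 1 : ℕ) : Int) from by omega]
      exact this
    have ht0s : (x - ((pvD S x : Int) - 1)) - 1 ∉ S := by
      have := pvD_not S x
      rw [show (x - ((pvD S x : Int) - 1)) - 1 = x - (pvD S x : Int) from by ring]
      exact this
    have hvle : pvD S x ≤ pvV S (x - ((pvD S x : Int) - 1)) := by
      apply pvV_le
      intro k hk
      have := pvD_mem (S := S) (x := x) (pvD S x - 1 - k) (by omega)
      rw [show x - ((pvD S x : Int) - 1) + (k : Int) = x - ((pvD S x - 1 - k : ℕ) : Int) from by omega]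
      exact this
    have hmemf : x - ((pvD S x : Int) - 1) ∈ S.filter (fun r => !(decide ((r - 1) ∈ S))) :=
      List.mem_filter.mpr ⟨ht0, by simpa using ht0s⟩
    calc ((pvD S x : ℕ) : Int) ≤ (pvV S (x - ((pvD S x : Int) - 1)) : Int) := by exact_mod_cast hvle
      _ ≤ _ := le_pvMaxOf hmemf
  · apply pvMaxOf_le pvMaxOf_nonneg
    intro r hr
    have hrS : r ∈ S := (List.mem_filter.mp hr).1
    have hv1 : 1 ≤ pvV S r := by rw [pvV_succ hrS]; omega
    have he : r + ((pvV S r : Int) - 1) ∈ S := by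
      have := pvV_mem (S := S) (x := r) (pvV S r - 1) (by omega)
      rw [show r + ((pvV S r : Int) - 1) = r + ((pvV S r - 1 : ℕ) : Int) from by omega]
      exact this
    have hdle : pvV S r ≤ pvD S (r + ((pvV S r : Int) - 1)) := by
      apply pvD_le
      intro k hk
      have := pvV_mem (S := S) (x := r) (pvV S r - 1 - k) (by omega)
      rw [show r + ((pvV S r : Int) - 1) - (k : Int) = r + ((pvV S r - 1 - k : ℕ) : Int) from by omega]
      exact this
    have hmem : r + ((pvV S r : Int) - 1) ∈ PySem.List.sorted S (fun x => x) false :=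
      pvMem_sorted.mpr he
    calc ((pvV S r : ℕ) : Int) ≤ (pvD S (r + ((pvV S r : Int) - 1)) : Int) := by exact_mod_cast hdle
      _ ≤ _ := le_pvMaxOf hmem

lemma pvUnion_eq (s : PySem.Set Int) : PySem.Set.union s [1] = PySem.Set.add s 1 := rfl

-- ===== VERDICT (by name: the statement is the Claim_ definition above) =====
theorem max_run_in_ranks_py_spec : Claim_equal_max_run_in_ranks_py := by
  intro ranks_iter _
  unfold Spec_max_run_in_ranks_py max_run_in_ranks_py max_run_in_ranks_py_alt
  simp only [pvUnion_eq]
  set rs0 : PySem.Set Int := PySem.Set.ofList ranks_iter with hrs0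
  set S : PySem.Set Int := if PySem.Set.contains rs0 14 then PySem.Set.add rs0 1 else rs0 with hS
  have hN : S.Nodup := by
    rw [hS]
    split
    · exact PySem.Set.nodup_add _ _ (PySem.Set.nodup_ofList ranks_iter)
    · exact PySem.Set.nodup_ofList ranks_iter
  by_cases hne : S = []
  · rw [if_pos hne, hne]
    rfl
  · rw [if_neg hne, pvA_char hN hne, pvBridge, pvB_char]
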